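-- pv_equiv track=rewrite | github.com/Slicer/Slicer | Modules/Scripted/DICOMPlugins/DICOMTID1500Plugin.py | enumerateDuplicateNames
-- ===== SOURCE A (Python) =====
-- from collections import Counter
--
-- def enumerateDuplicateNames(items):
--   names = [item["name"] for item in items]
--   counts = {k: v for k, v in Counter(names).items() if v > 1}
--   nameListCopy = names[:]
--
--   for i in reversed(range(len(names))):
--     item = names[i]
--     if counts.get(item):
--       nameListCopy[i] += " (%s)" % str(counts[item])
--       counts[item] -= 1
--
--   for idx, item in enumerate(nameListCopy):
--     items[idx]["name"] = item
--   return items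
-- ===== SOURCE B (Python) =====
-- from collections import Counter
--
-- def enumerateDuplicateNames(items):
--   total = Counter(item["name"] for item in items)
--   seen = Counter()
--   for item in items:
--     name = item["name"]
--     seen[name] += 1
--     if total[name] > 1:
--       item["name"] = name + " (%s)" % seen[name]
--   return items
-- ===== Notes on version B (the rewrite author's own statement) =====
-- stated objective: simpler
-- what changed: A builds a name list, a filtered count dict, annotates a copy in a reverse pass by counting the duplicates down, and writes every name back; B makes one forward pass with a running 'seen' counter and renames only the duplicated items in place.
import Mathlib
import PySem

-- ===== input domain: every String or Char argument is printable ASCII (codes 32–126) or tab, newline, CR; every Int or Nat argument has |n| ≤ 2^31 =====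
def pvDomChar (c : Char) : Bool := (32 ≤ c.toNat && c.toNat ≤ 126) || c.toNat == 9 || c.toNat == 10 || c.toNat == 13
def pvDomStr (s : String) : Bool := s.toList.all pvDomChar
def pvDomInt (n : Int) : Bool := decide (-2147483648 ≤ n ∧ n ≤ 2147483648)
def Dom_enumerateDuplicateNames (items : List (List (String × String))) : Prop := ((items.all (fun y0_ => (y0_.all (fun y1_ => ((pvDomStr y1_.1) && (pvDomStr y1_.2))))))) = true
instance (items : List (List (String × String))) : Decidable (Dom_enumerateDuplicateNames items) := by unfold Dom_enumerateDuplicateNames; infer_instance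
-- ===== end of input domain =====

-- B replaces A's three phases (name list, reverse countdown pass over a copy, full write-back)
-- by one forward pass with a running 'seen' counter, renaming only duplicates; objective: simpler.
-- (Python A and B both mutate `items` in place; the equivalence proved here is about the return value.)


-- ===== PORT A =====
-- item["name"] (Pre_ guarantees the key is present, so the default is never used)
def pvGetName (d : List (String × String)) : String :=
  ((PySem.Dict.mk d).get? "name").getD ""

-- item["name"] = nm  (dict assignment: overwrite in place)
def pvSetName (d : List (String × String)) (nm : String) : List (String × String) :=
  ((PySem.Dict.mk d).insert "name" nm).items

-- body of A's `for i in reversed(range(len(names)))` loop; state = (nameListCopy, counts)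
def pvStepA (names : List String) (st : List String × PySem.Dict String Int) (i : Nat) :
    List String × PySem.Dict String Int :=
  let item := names.getD i ""
  match st.2.get? item with
  | some v =>
      if v ≠ 0 then
        (st.1.set i ((st.1.getD i "") ++ " (" ++ PySem.Int.toStr v ++ ")"), st.2.insert item (v - 1))
      else st
  | none => st

-- body of A's write-back loop `items[idx]["name"] = item`
def pvWriteStep (acc : List (List (String × String))) (p : Int × String) :
    List (List (String × String)) :=
  acc.set p.1.toNat (pvSetName (acc.getD p.1.toNat []) p.2)

def enumerateDuplicateNames (items : List (List (String × String))) : List (List (String × String)) :=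
  let names := items.map pvGetName
  -- {k: v for k, v in Counter(names).items() if v > 1}: Counter keys are distinct, so the
  -- comprehension is the order-preserving filter of the Counter's items
  let counts : PySem.Dict String Int :=
    PySem.Dict.mk (((PySem.Dict.counter names).items).filter (fun kv => decide (1 < kv.2)))
  let st := ((List.range names.length).reverse).foldl (pvStepA names) (names, counts)
  (PySem.List.enumerate st.1).foldl pvWriteStep items

-- ===== PORT B =====
-- body of B's single forward loop; state = (output so far, seen counter)
def pvStepB (total : PySem.Dict String Int)
    (st : List (List (String × String)) × PySem.Dict String Int)
    (item : List (String × String)) :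
    List (List (String × String)) × PySem.Dict String Int :=
  let name := pvGetName item
  let seen := st.2.modify name 0 (· + 1)
  if 1 < total.getD name 0 then
    (st.1 ++ [pvSetName item (name ++ " (" ++ PySem.Int.toStr (seen.getD name 0) ++ ")")], seen)
  else
    (st.1 ++ [item], seen)

def enumerateDuplicateNames_alt (items : List (List (String × String))) : List (List (String × String)) :=
  let total := PySem.Dict.counter (items.map pvGetName)
  (items.foldl (pvStepB total) ([], PySem.Dict.empty)).1

-- ===== PRECONDITION & SPEC =====
-- Pre_ excludes items without a "name" key (Python A raises KeyError there) and association
-- lists with a repeated key, which do not represent any Python dict input.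
def Pre_enumerateDuplicateNames (items : List (List (String × String))) : Prop :=
  ∀ d ∈ items, (d.map Prod.fst).Nodup ∧ "name" ∈ d.map Prod.fst
instance (items : List (List (String × String))) : Decidable (Pre_enumerateDuplicateNames items) := by
  unfold Pre_enumerateDuplicateNames; infer_instance

def pvWitness_enumerateDuplicateNames : (List (List (String × String))) :=
  [[("name", "a")], [("name", "a"), ("id", "1")], [("name", "b")]]

def Spec_enumerateDuplicateNames (items : List (List (String × String))) (out : List (List (String × String))) : Prop := out = enumerateDuplicateNames_alt items
instance (items : List (List (String × String))) (out : List (List (String × String))) : Decidable (Spec_enumerateDuplicateNames items out) := by unfold Spec_enumerateDuplicateNames; infer_instance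

-- ===== CLAIM (what is proved, stated in full; the proofs are below) =====
def Claim_equal_enumerateDuplicateNames : Prop := ∀ (items : List (List (String × String))), Dom_enumerateDuplicateNames items → Pre_enumerateDuplicateNames items → Spec_enumerateDuplicateNames items (enumerateDuplicateNames items)

-- ===== LEMMAS AND PROOFS =====

-- the final name of position i (annotated with its 1-based occurrence number iff its name repeats)
def pvFinal (names : List String) (i : Nat) : String :=
  let nm := names.getD i ""
  if 1 < names.count nm then
    nm ++ " (" ++ PySem.Int.toStr (((names.take i).count nm : Int) + 1) ++ ")"
  else nm

-- nameListCopy after A's reverse loop has processed all indices ≥ i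
def pvCopyAt (names : List String) (i : Nat) : List String :=
  names.mapIdx (fun j nm => if i ≤ j then pvFinal names j else nm)

-- the distinct duplicated names, in first-occurrence order
def pvGood (names : List String) : List String :=
  (PySem.Set.ofList names).filter (fun k => decide (1 < ((names.count k : Int))))

-- A's counts dict after the reverse loop has processed all indices ≥ i
def pvCAt (names : List String) (i : Nat) : PySem.Dict String Int :=
  PySem.Dict.mk ((pvGood names).map (fun k => (k, (names.count k : Int) - ((names.drop i).count k : Int))))

theorem pv_get?_mk_map (gn : List String) (h : String → Int) (k : String) :
    (PySem.Dict.mk (gn.map (fun x => (x, h x)))).get? k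
      = if k ∈ gn then some (h k) else none := by
  induction gn with
  | nil => simp [PySem.Dict.get?]
  | cons x t ih =>
    simp only [List.map_cons, PySem.Dict.get?_mk_cons, ih]
    by_cases hx : x = k
    · subst hx; simp
    · simp [hx, Ne.symm hx]

theorem pv_insert_mk_map (gn : List String) (h : String → Int) (k : String) (v : Int)
    (hk : k ∈ gn) :
    (PySem.Dict.mk (gn.map (fun x => (x, h x)))).insert k v
      = PySem.Dict.mk (gn.map (fun x => (x, if x = k then v else h x))) := by
  apply PySem.Dict.ext
  rw [PySem.Dict.items_insert_of_contains]
  · simp only [List.map_map]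
    apply List.map_congr_left
    intro x hx
    by_cases hxk : x = k
    · subst hxk; simp
    · simp [Function.comp, hxk]
  · rw [PySem.Dict.contains_mk]
    simp only [List.any_map, List.any_eq_true]
    exact ⟨k, hk, by simp [Function.comp]⟩

theorem pv_stepA_eq (names : List String) (i : Nat) (hi : i < names.length) :
    pvStepA names (pvCopyAt names (i + 1), pvCAt names (i + 1)) i
      = (pvCopyAt names i, pvCAt names i) := by
  have hnm : names.getD i "" = names[i] := List.getD_eq_getElem names "" hi
  have htake : names.take (i + 1) = names.take i ++ [names[i]] := by
    rw [List.take_add_one]; simp [List.getElem?_eq_getElem hi]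
  have hsplit : names.count names[i]
      = (names.take i).count names[i] + 1 + (names.drop (i + 1)).count names[i] := by
    have h0 : names.count names[i]
        = (names.take (i + 1) ++ names.drop (i + 1)).count names[i] := by
      rw [List.take_append_drop]
    rw [h0, List.count_append, htake, List.count_append]
    simp
  have hdrop : names.drop i = names[i] :: names.drop (i + 1) :=
    (List.getElem_cons_drop hi).symm
  have hmemgood : ∀ x, x ∈ pvGood names ↔ x ∈ names ∧ 1 < names.count x := by
    intro x
    simp only [pvGood, List.mem_filter, PySem.Set.mem_ofList, decide_eq_true_eq]
    constructor
    · rintro ⟨h1, h2⟩; exact ⟨h1, by exact_mod_cast h2⟩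
    · rintro ⟨h1, h2⟩; exact ⟨h1, by exact_mod_cast h2⟩
  have hcopylen : ∀ m, (pvCopyAt names m).length = names.length := by
    intro m; simp [pvCopyAt]
  have hcopyget : ∀ m (j : Nat) (hj : j < names.length),
      (pvCopyAt names m)[j]'(by rw [hcopylen]; exact hj)
        = if m ≤ j then pvFinal names j else names[j] := by
    intro m j hj; simp [pvCopyAt]
  by_cases hc : 1 < names.count names[i]
  · -- duplicated name: the counts entry is hit and decremented
    have hmem : names[i] ∈ pvGood names := (hmemgood _).2 ⟨List.getElem_mem hi, hc⟩
    have hget : (pvCAt names (i + 1)).get? (names.getD i "")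
        = some ((names.count names[i] : Int) - ((names.drop (i + 1)).count names[i] : Int)) := by
      rw [hnm, pvCAt, pv_get?_mk_map, if_pos hmem]
    have hv : (names.count names[i] : Int) - ((names.drop (i + 1)).count names[i] : Int)
        = ((names.take i).count names[i] : Int) + 1 := by
      rw [hsplit]; push_cast; ring
    simp only [pvStepA, hget, hv]
    rw [if_pos (by omega : ((names.take i).count names[i] : Int) + 1 ≠ 0)]
    refine Prod.ext ?_ ?_
    · -- nameListCopy: position i receives its final annotated name
      have hgetD : (pvCopyAt names (i + 1)).getD i ""
          = names[i] := by
        rw [List.getD_eq_getElem _ "" (by rw [hcopylen]; exact hi), hcopyget (i+1) i hi]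
        simp
      apply List.ext_getElem (by simp [hcopylen])
      intro j hj1 hj2
      rw [List.getElem_set]
      have hjlen : j < names.length := by simpa [hcopylen] using hj2
      rw [hcopyget i j hjlen]
      by_cases hji : i = j
      · subst hji
        rw [if_pos rfl, if_pos (le_refl _), hgetD, pvFinal]
        simp only [hnm]
        rw [if_pos hc]
      · rw [if_neg hji, hcopyget (i+1) j hjlen]
        by_cases hle : i ≤ j
        · rw [if_pos hle, if_pos (by omega)]
        · rw [if_neg hle, if_neg (by omega)]
    · -- counts: the entry of names[i] is decremented
      simp only [pvCAt, hnm]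
      rw [pv_insert_mk_map _ _ _ _ hmem]
      congr 1
      apply List.map_congr_left
      intro x hx
      by_cases hxnm : x = names[i]
      · subst hxnm
        rw [if_pos rfl, hdrop, List.count_cons_self]
        refine Prod.ext rfl ?_
        push_cast; omega
      · rw [if_neg hxnm, hdrop, List.count_cons]
        simp [Ne.symm hxnm]
  · -- unique name: not in counts, state unchanged (and already equals the target)
    have hmem : names[i] ∉ pvGood names := fun h => hc ((hmemgood _).1 h).2
    have hget : (pvCAt names (i + 1)).get? (names.getD i "") = none := by
      rw [hnm, pvCAt, pv_get?_mk_map, if_neg hmem]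
    simp only [pvStepA, hget]
    refine Prod.ext ?_ ?_
    · apply List.ext_getElem (by simp [hcopylen])
      intro j hj1 hj2
      have hjlen : j < names.length := by simpa [hcopylen] using hj2
      rw [hcopyget (i+1) j hjlen, hcopyget i j hjlen]
      by_cases hji : j = i
      · subst hji
        rw [if_neg (by omega), if_pos (le_refl _), pvFinal]
        simp only [hnm]
        rw [if_neg hc]
      · by_cases hle : i ≤ j
        · rw [if_pos (by omega), if_pos hle]
        · rw [if_neg (by omega), if_neg hle]
    · simp only [pvCAt]
      congr 1
      apply List.map_congr_left
      intro x hx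
      have hxnm : x ≠ names[i] := fun h => hmem (h ▸ hx)
      rw [hdrop, List.count_cons]
      simp [Ne.symm hxnm]

theorem pv_loopA (names : List String) :
    ∀ i, i ≤ names.length →
      ((List.range i).reverse).foldl (pvStepA names) (pvCopyAt names i, pvCAt names i)
        = (pvCopyAt names 0, pvCAt names 0) := by
  intro i
  induction i with
  | zero => intro _; simp
  | succ n ih =>
    intro h
    rw [List.range_succ, List.reverse_append]
    simp only [List.reverse_singleton, List.singleton_append, List.foldl_cons]
    rw [pv_stepA_eq names n (by omega)]
    exact ih (by omega)

theorem pv_initA (names : List String) :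
    (names, PySem.Dict.mk (((PySem.Dict.counter names).items).filter (fun kv => decide (1 < kv.2))))
      = (pvCopyAt names names.length, pvCAt names names.length) := by
  have h1 : names = pvCopyAt names names.length := by
    apply List.ext_getElem (by simp [pvCopyAt])
    intro j hj1 hj2
    simp only [pvCopyAt, List.getElem_mapIdx]
    rw [if_neg (by omega)]
  have h2 : PySem.Dict.mk (((PySem.Dict.counter names).items).filter (fun kv => decide (1 < kv.2)))
      = pvCAt names names.length := by
    apply PySem.Dict.ext
    simp only [pvCAt]
    rw [PySem.Dict.items_counter, List.filter_map]
    apply List.map_congr_left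
    intro x hx
    simp [List.drop_length]
  rw [← h1, ← h2]

theorem pv_writeback :
    ∀ (l : List String) (pre post : List (List (String × String))),
      l.length = post.length →
      (PySem.List.enumerate l (pre.length : Int)).foldl pvWriteStep (pre ++ post)
        = pre ++ (post.zip l).map (fun q => pvSetName q.1 q.2) := by
  intro l
  induction l with
  | nil =>
    intro pre post h
    cases post with
    | nil => simp [PySem.List.enumerate]
    | cons d post' => simp at h
  | cons nm rest ih =>
    intro pre post h
    cases post with
    | nil => simp at h
    | cons d post' =>
      rw [PySem.List.enumerate_cons, List.foldl_cons]
      have hget : (pre ++ d :: post').getD pre.length [] = d := by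
        rw [List.getD_eq_getElem?_getD, List.getElem?_append_right (le_refl _)]
        simp
      have hstep : pvWriteStep (pre ++ d :: post') ((pre.length : Int), nm)
          = (pre ++ [pvSetName d nm]) ++ post' := by
        simp only [pvWriteStep, Int.toNat_natCast, hget]
        rw [List.set_append_right _ _ (le_refl _)]
        simp
      rw [hstep,
        show (pre.length : Int) + 1 = ((pre ++ [pvSetName d nm]).length : Int) by simp,
        ih (pre ++ [pvSetName d nm]) post' (by simpa using h)]
      simp [List.append_assoc]

theorem pv_A_eq (items : List (List (String × String))) :
    enumerateDuplicateNames items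
      = (items.zip (pvCopyAt (items.map pvGetName) 0)).map (fun q => pvSetName q.1 q.2) := by
  simp only [enumerateDuplicateNames]
  rw [pv_initA, pv_loopA _ _ (le_refl _)]
  have hw := pv_writeback (pvCopyAt (items.map pvGetName) 0) [] items (by simp [pvCopyAt])
  simpa using hw

theorem pv_loopB (total : PySem.Dict String Int) :
    ∀ (rest : List (List (String × String))) (acc : List (List (String × String))) (ns : List String),
      (rest.foldl (pvStepB total) (acc, PySem.Dict.counter ns)).1
        = acc ++ rest.mapIdx (fun j d =>
            let nm := pvGetName d
            if 1 < total.getD nm 0 then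
              pvSetName d (nm ++ " (" ++ PySem.Int.toStr (((ns ++ (rest.map pvGetName).take j).count nm : Int) + 1) ++ ")")
            else d) := by
  intro rest
  induction rest with
  | nil => intro acc ns; simp
  | cons d rest' ih =>
    intro acc ns
    rw [List.foldl_cons]
    have hseen : (PySem.Dict.counter ns).modify (pvGetName d) 0 (· + 1)
        = PySem.Dict.counter (ns ++ [pvGetName d]) :=
      (PySem.Dict.counter_append_singleton ns (pvGetName d)).symm
    have htail : (fun (j : Nat) (d' : List (String × String)) =>
          let nm := pvGetName d'
          if 1 < total.getD nm 0 then
            pvSetName d' (nm ++ " (" ++ PySem.Int.toStr ((((ns ++ [pvGetName d]) ++ (rest'.map pvGetName).take j).count nm : Int) + 1) ++ ")")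
          else d')
        = (fun (j : Nat) (d' : List (String × String)) =>
          let nm := pvGetName d'
          if 1 < total.getD nm 0 then
            pvSetName d' (nm ++ " (" ++ PySem.Int.toStr (((ns ++ ((d :: rest').map pvGetName).take (j + 1)).count nm : Int) + 1) ++ ")")
          else d') := by
      funext j d'
      simp [List.take_succ_cons, List.append_assoc]
    by_cases hdup : 1 < total.getD (pvGetName d) 0
    · simp only [pvStepB, hseen, PySem.Dict.getD_counter]
      rw [if_pos hdup, ih, htail]
      simp only [List.mapIdx_cons]
      rw [if_pos hdup]
      simp [List.append_assoc]
    · simp only [pvStepB, hseen, PySem.Dict.getD_counter]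
      rw [if_neg hdup, ih, htail]
      simp only [List.mapIdx_cons]
      rw [if_neg hdup]
      simp [List.append_assoc]

theorem pv_map_replace_eq_self :
    ∀ (d : List (String × String)) (v : String),
      (d.map Prod.fst).Nodup → (PySem.Dict.mk d).get? "name" = some v →
      d.map (fun p => if p.1 == "name" then ("name", v) else p) = d := by
  intro d
  induction d with
  | nil => intro v _ _; simp
  | cons p t ih =>
    intro v hnd hget
    obtain ⟨k, w⟩ := p
    rw [PySem.Dict.get?_mk_cons] at hget
    simp only [List.map_cons, List.map_cons] at hnd ⊢
    by_cases hk : k = "name"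
    · subst hk
      simp only [beq_self_eq_true, if_pos] at hget ⊢
      injection hget with hv
      subst hv
      have hnot : "name" ∉ t.map Prod.fst := by
        simp only [List.nodup_cons] at hnd; exact hnd.1
      congr 1
      conv_rhs => rw [← List.map_id t]
      apply List.map_congr_left
      intro q hq
      rw [if_neg, id]
      simp only [beq_iff_eq]
      intro hq1
      exact hnot (hq1 ▸ List.mem_map_of_mem hq)
    · rw [if_neg (by simpa using hk)] at hget ⊢
      rw [ih v (List.Nodup.of_cons hnd) hget]

theorem pv_setName_getName (d : List (String × String))
    (hnd : (d.map Prod.fst).Nodup) (hmem : "name" ∈ d.map Prod.fst) :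
    pvSetName d (pvGetName d) = d := by
  have hcon : (PySem.Dict.mk d).contains "name" = true := by
    rw [PySem.Dict.contains_iff_mem_keys, PySem.Dict.keys_mk]
    exact hmem
  obtain ⟨v, hv⟩ : ∃ v, (PySem.Dict.mk d).get? "name" = some v := by
    rw [PySem.Dict.contains_eq_isSome_get?] at hcon
    exact Option.isSome_iff_exists.1 hcon
  simp only [pvSetName, pvGetName, hv, Option.getD_some]
  rw [PySem.Dict.items_insert_of_contains _ _ hcon]
  exact pv_map_replace_eq_self d v hnd hv

theorem pv_B_eq (items : List (List (String × String))) :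
    enumerateDuplicateNames_alt items
      = items.mapIdx (fun j d =>
          let nm := pvGetName d
          if 1 < (PySem.Dict.counter (items.map pvGetName)).getD nm 0 then
            pvSetName d (nm ++ " (" ++ PySem.Int.toStr ((((items.map pvGetName).take j).count nm : Int) + 1) ++ ")")
          else d) := by
  simp only [enumerateDuplicateNames_alt]
  rw [show (PySem.Dict.empty : PySem.Dict String Int) = PySem.Dict.counter [] from rfl,
    pv_loopB _ items [] []]
  simp

-- ===== VERDICT (by name: the statement is the Claim_ definition above) =====
theorem enumerateDuplicateNames_spec : Claim_equal_enumerateDuplicateNames := by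
  intro items _hdom hpre
  unfold Spec_enumerateDuplicateNames
  rw [pv_A_eq, pv_B_eq]
  apply List.ext_getElem
  · simp [pvCopyAt]
  intro j h1 h2
  have hj : j < items.length := by simpa using h2
  have hjn : j < (items.map pvGetName).length := by simpa using hj
  rw [List.getElem_map, List.getElem_zip, List.getElem_mapIdx]
  have hcopy : (pvCopyAt (items.map pvGetName) 0)[j]'(by simpa [pvCopyAt] using hjn)
      = pvFinal (items.map pvGetName) j := by
    simp [pvCopyAt]
  rw [hcopy]
  have hnmj : (items.map pvGetName).getD j "" = pvGetName items[j] := by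
    rw [List.getD_eq_getElem _ _ hjn, List.getElem_map]
  simp only [pvFinal, hnmj, PySem.Dict.getD_counter]
  by_cases hc : 1 < (items.map pvGetName).count (pvGetName items[j])
  · rw [if_pos hc, if_pos (by exact_mod_cast hc)]
  · rw [if_neg hc, if_neg (by exact_mod_cast hc)]
    exact pv_setName_getName items[j] (hpre _ (List.getElem_mem hj)).1 (hpre _ (List.getElem_mem hj)).2
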